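-- pv_equiv track=rewrite | github.com/Multu/vps | level0/lesson24/main.py | shift_line_matrix
-- ===== SOURCE A (Python) =====
-- def shift_line_matrix(matrix, t):
--     m = len(matrix)
--     t = t % m
--
--     shifted_matrix = list(matrix)
--     for i in range(m):
--         new_pos = i + t
--         if new_pos > m - 1:
--             new_pos = new_pos - m
--         shifted_matrix[new_pos] = matrix[i]
--
--     return shifted_matrix
-- ===== SOURCE B (Python) =====
-- def shift_line_matrix(matrix, t):
--     m = len(matrix)
--     t = t % m
--     lst = list(matrix)
--     return lst[m - t:] + lst[:m - t]
-- ===== Notes on version B (the rewrite author's own statement) =====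
-- stated objective: simpler
-- what changed: The per-element placement loop (computing a wrapped target index for every row and writing it into a copy) is replaced by a single closed-form slice-and-concatenate lst[m-t:] + lst[:m-t] after reducing t modulo m.
import Mathlib
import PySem

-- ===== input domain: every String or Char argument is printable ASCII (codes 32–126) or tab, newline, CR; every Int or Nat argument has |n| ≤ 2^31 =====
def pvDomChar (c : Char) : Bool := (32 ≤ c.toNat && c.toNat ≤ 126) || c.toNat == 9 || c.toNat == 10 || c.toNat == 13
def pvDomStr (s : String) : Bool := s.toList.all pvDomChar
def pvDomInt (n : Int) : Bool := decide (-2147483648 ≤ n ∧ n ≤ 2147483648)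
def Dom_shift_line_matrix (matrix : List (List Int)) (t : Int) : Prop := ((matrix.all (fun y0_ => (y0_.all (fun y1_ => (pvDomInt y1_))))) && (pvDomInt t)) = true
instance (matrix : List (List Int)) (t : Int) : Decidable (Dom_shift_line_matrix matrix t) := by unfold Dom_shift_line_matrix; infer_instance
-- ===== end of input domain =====

-- B replaces A's per-element wrapped-index placement loop by one closed-form
-- slice-and-concatenate; same O(m) cost, simpler.

-- ===== PORT A =====
def shift_line_matrix (matrix : List (List Int)) (t : Int) : List (List Int) :=
  let m : Int := PySem.List.len matrix
  let t' : Int := PySem.Int.mod t m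
  let shifted := matrix            -- list(matrix)
  (PySem.List.pyRange 0 m 1).foldl (fun acc i =>
    let newPos := i + t'
    let newPos := if newPos > m - 1 then newPos - m else newPos
    -- shifted_matrix[new_pos] = matrix[i]; both indices are in range for every
    -- input Pre_ admits, so the total forms pySetD/pyGetD are exact here
    PySem.List.pySetD acc newPos (PySem.List.pyGetD matrix i [])) shifted

-- ===== PORT B =====
def shift_line_matrix_alt (matrix : List (List Int)) (t : Int) : List (List Int) :=
  let m : Int := PySem.List.len matrix
  let t' : Int := PySem.Int.mod t m
  let lst := matrix                -- list(matrix)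
  PySem.List.slice lst (some (m - t')) none ++ PySem.List.slice lst none (some (m - t'))

-- ===== PRECONDITION & SPEC =====
-- Pre_ excludes only the empty matrix, on which A (and B) raise ZeroDivisionError at 't % m'.
def Pre_shift_line_matrix (matrix : List (List Int)) (t : Int) : Prop := matrix ≠ []
instance (matrix : List (List Int)) (t : Int) : Decidable (Pre_shift_line_matrix matrix t) := by unfold Pre_shift_line_matrix; infer_instance

def pvWitness_shift_line_matrix : List (List Int) × Int := ([[1], [2], [3]], 1)

def Spec_shift_line_matrix (matrix : List (List Int)) (t : Int) (out : List (List Int)) : Prop := out = shift_line_matrix_alt matrix t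
instance (matrix : List (List Int)) (t : Int) (out : List (List Int)) : Decidable (Spec_shift_line_matrix matrix t out) := by unfold Spec_shift_line_matrix; infer_instance

-- ===== CLAIM (what is proved, stated in full; the proofs are below) =====
def Claim_equal_shift_line_matrix : Prop := ∀ (matrix : List (List Int)) (t : Int), Dom_shift_line_matrix matrix t → Pre_shift_line_matrix matrix t → Spec_shift_line_matrix matrix t (shift_line_matrix matrix t)

-- ===== LEMMAS AND PROOFS =====

-- the length of A's fold state never changes
lemma length_foldl_set {α : Type} (l : List Nat) (p : Nat → Nat) (f : Nat → α) (init : List α) :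
    (l.foldl (fun acc i => acc.set (p i) (f i)) init).length = init.length := by
  induction l generalizing init with
  | nil => rfl
  | cons a l ih => simp [List.foldl_cons, ih]

-- indexing into a fold of set-operations whose target positions are injective
lemma getElem?_foldl_set {α : Type} (l : List Nat) (p : Nat → Nat) (f : Nat → α)
    (init : List α)
    (hinj : ∀ a ∈ l, ∀ b ∈ l, p a = p b → a = b)
    (hlt : ∀ a ∈ l, p a < init.length) (j : Nat) :
    (l.foldl (fun acc i => acc.set (p i) (f i)) init)[j]? =
      match l.find? (fun i => p i == j) with
      | some i => some (f i)
      | none => init[j]? := by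
  induction l generalizing init with
  | nil => rfl
  | cons a l ih =>
    have hlen : (init.set (p a) (f a)).length = init.length := by simp
    rw [List.foldl_cons]
    rw [ih (init.set (p a) (f a))
        (fun x hx y hy h => hinj x (List.mem_cons_of_mem _ hx) y (List.mem_cons_of_mem _ hy) h)
        (fun x hx => by rw [hlen]; exact hlt x (List.mem_cons_of_mem _ hx))]
    by_cases hpa : p a = j
    · have hfind : List.find? (fun i => p i == j) (a :: l) = some a := by
        simp [hpa]
      rw [hfind]
      cases hf : List.find? (fun i => p i == j) l with
      | some i =>
        have hi : i ∈ l := List.mem_of_find?_eq_some hf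
        have hpi : p i = j := by
          have := List.find?_some hf; simpa using this
        have : i = a := hinj i (List.mem_cons_of_mem _ hi) a List.mem_cons_self (hpa ▸ hpi)
        simp [this]
      | none =>
        subst hpa
        simp [List.getElem?_set_self (hlt a List.mem_cons_self)]
    · have hfind : List.find? (fun i => p i == j) (a :: l) = List.find? (fun i => p i == j) l := by
        simp [hpa]
      rw [hfind]
      cases List.find? (fun i => p i == j) l with
      | some i => rfl
      | none => simp [List.getElem?_set_ne (by omega : p a ≠ j)]

-- find? on range n with a predicate having a unique satisfier
lemma find?_range_unique (n : Nat) (pred : Nat → Bool) (i0 : Nat) (h0 : i0 < n)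
    (hp : pred i0 = true) (huniq : ∀ i < n, pred i = true → i = i0) :
    List.find? pred (List.range n) = some i0 := by
  have hmem : i0 ∈ List.range n := List.mem_range.mpr h0
  have hsome : (List.find? pred (List.range n)).isSome := by
    rw [List.find?_isSome]; exact ⟨i0, hmem, hp⟩
  cases hf : List.find? pred (List.range n) with
  | none => rw [hf] at hsome; simp at hsome
  | some i =>
    have hi : i ∈ List.range n := List.mem_of_find?_eq_some hf
    have : i = i0 := huniq i (List.mem_range.mp hi) (List.find?_some hf)
    rw [this]

-- ===== VERDICT (by name: the statement is the Claim_ definition above) =====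
theorem shift_line_matrix_spec : Claim_equal_shift_line_matrix := by
  intro matrix t _ hpre
  show shift_line_matrix matrix t = shift_line_matrix_alt matrix t
  simp only [shift_line_matrix, shift_line_matrix_alt, PySem.List.len_eq]
  set n : Nat := matrix.length with hn
  have hnpos : 0 < n := by
    cases matrix with
    | nil => exact absurd rfl hpre
    | cons a l => simp [hn]
  have hmod : PySem.Int.mod t (n : Int) = t % (n : Int) :=
    PySem.Int.mod_eq_emod_of_pos (by exact_mod_cast hnpos)
  set t' : Int := PySem.Int.mod t (n : Int) with ht'
  have ht'lo : 0 ≤ t' := by rw [hmod]; exact Int.emod_nonneg t (by positivity)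
  have ht'hi : t' < (n : Int) := by rw [hmod]; exact Int.emod_lt_of_pos t (by exact_mod_cast hnpos)
  set tk : Nat := t'.toNat with htk
  have htcast : (tk : Int) = t' := Int.toNat_of_nonneg ht'lo
  have htkn : tk < n := by omega
  set k : Nat := n - tk with hk
  clear_value n t' tk k
  -- B reduces to drop k ++ take k
  have hB : PySem.List.slice matrix (some ((n : Int) - t')) none ++
      PySem.List.slice matrix none (some ((n : Int) - t')) =
      matrix.drop k ++ matrix.take k := by
    have h1 : ((n : Int) - t') = (k : Int) := by omega
    rw [h1, PySem.List.slice_from_natCast, PySem.List.slice_to_natCast]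
  rw [hB]
  -- A reduces to a fold of set-operations over List.range n
  rw [PySem.List.pyRange_zero_natCast, List.foldl_map]
  have hstep : ∀ (acc : List (List Int)) (i : Nat), i ∈ List.range n →
      PySem.List.pySetD acc
          (if (i : Int) + t' > (n : Int) - 1 then (i : Int) + t' - (n : Int) else (i : Int) + t')
          (PySem.List.pyGetD matrix (i : Int) []) =
      acc.set ((i + tk) % n) (matrix.getD i []) := by
    intro acc i hi
    have hiN : i < n := List.mem_range.mp hi
    have hnp : (if (i : Int) + t' > (n : Int) - 1 then (i : Int) + t' - (n : Int) else (i : Int) + t') =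
        (((i + tk) % n : Nat) : Int) := by
      by_cases hc : (i : Int) + t' > (n : Int) - 1
      · rw [if_pos hc]
        have hge : n ≤ i + tk := by omega
        rw [Nat.mod_eq_sub_mod hge, Nat.mod_eq_of_lt (by omega)]
        omega
      · rw [if_neg hc]
        rw [Nat.mod_eq_of_lt (by omega)]
        omega
    rw [hnp, PySem.List.pySetD_natCast, PySem.List.pyGetD_natCast]
  rw [PySem.List.foldl_congr_mem (List.range n) _
        (fun (acc : List (List Int)) (i : Nat) => acc.set ((i + tk) % n) (matrix.getD i []))
        matrix hstep]
  -- now compare elementwise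
  have hAlen : (List.foldl (fun acc i => acc.set ((i + tk) % n) (matrix.getD i []))
      matrix (List.range n)).length = n := by rw [length_foldl_set]; exact hn.symm
  have hBlen : (matrix.drop k ++ matrix.take k).length = n := by
    simp [hn]; omega
  apply List.ext_getElem?
  intro j
  by_cases hj : j < n
  · have hinj : ∀ a ∈ List.range n, ∀ b ∈ List.range n, (a + tk) % n = (b + tk) % n → a = b := by
      intro a ha b hb h
      have haN := List.mem_range.mp ha
      have hbN := List.mem_range.mp hb
      have h1 : (a + tk) % n = (b + tk) % n := h
      rcases Nat.lt_or_ge (a + tk) n with hca | hca <;>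
        rcases Nat.lt_or_ge (b + tk) n with hcb | hcb <;>
        [skip; skip; skip; skip] <;>
        · first
          | (rw [Nat.mod_eq_of_lt hca, Nat.mod_eq_of_lt hcb] at h1; omega)
          | (rw [Nat.mod_eq_of_lt hca, Nat.mod_eq_sub_mod hcb, Nat.mod_eq_of_lt (by omega)] at h1; omega)
          | (rw [Nat.mod_eq_sub_mod hca, Nat.mod_eq_of_lt (by omega), Nat.mod_eq_of_lt hcb] at h1; omega)
          | (rw [Nat.mod_eq_sub_mod hca, Nat.mod_eq_of_lt (by omega), Nat.mod_eq_sub_mod hcb,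
              Nat.mod_eq_of_lt (by omega)] at h1; omega)
    have hlt : ∀ a ∈ List.range n, (a + tk) % n < matrix.length := by
      intro a _; rw [← hn]; exact Nat.mod_lt _ hnpos
    rw [getElem?_foldl_set (List.range n) (fun i => (i + tk) % n) (fun i => matrix.getD i [])
        matrix hinj hlt j]
    have hdlen : (matrix.drop k).length = tk := by rw [List.length_drop, ← hn]; omega
    by_cases hjt : j < tk
    · -- the unique source index is k + j
      have hmodkj : (k + j + tk) % n = j := by
        rw [show k + j + tk = j + n by omega, Nat.add_mod_right, Nat.mod_eq_of_lt hj]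
      have hfind : List.find? (fun i => (i + tk) % n == j) (List.range n) = some (k + j) := by
        apply find?_range_unique n _ (k + j) (by omega)
        · simp [hmodkj]
        · intro i hiN hpi
          have hpi' : (i + tk) % n = j := by simpa using hpi
          exact hinj i (List.mem_range.mpr hiN) (k + j) (List.mem_range.mpr (by omega))
            (by rw [hpi', hmodkj])
      rw [hfind]
      rw [List.getElem?_append_left (by rw [hdlen]; omega : j < (matrix.drop k).length)]
      rw [List.getElem?_drop]
      rw [List.getElem?_eq_getElem (by rw [← hn]; omega : k + j < matrix.length)]
      exact congrArg some (List.getD_eq_getElem matrix [] (by rw [← hn]; omega : k + j < matrix.length))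
    · -- the unique source index is j - tk
      have hmodjt : (j - tk + tk) % n = j := by
        rw [show j - tk + tk = j by omega, Nat.mod_eq_of_lt hj]
      have hfind : List.find? (fun i => (i + tk) % n == j) (List.range n) = some (j - tk) := by
        apply find?_range_unique n _ (j - tk) (by omega)
        · simp [hmodjt]
        · intro i hiN hpi
          have hpi' : (i + tk) % n = j := by simpa using hpi
          exact hinj i (List.mem_range.mpr hiN) (j - tk) (List.mem_range.mpr (by omega))
            (by rw [hpi', hmodjt])
      rw [hfind]
      rw [List.getElem?_append_right (by rw [hdlen]; omega : (matrix.drop k).length ≤ j)]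
      rw [hdlen]
      rw [List.getElem?_take, if_pos (by omega : j - tk < k)]
      rw [List.getElem?_eq_getElem (by rw [← hn]; omega : j - tk < matrix.length)]
      exact congrArg some (List.getD_eq_getElem matrix [] (by rw [← hn]; omega : j - tk < matrix.length))
  · rw [List.getElem?_eq_none (by rw [hAlen]; omega)]
    rw [List.getElem?_eq_none (by rw [hBlen]; omega)]
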